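-- pv_equiv track=rewrite | github.com/woduq1414/ps_study | 백준/Platinum/12941. 동전 게임/동전 게임.py | odd_get_grundy_num
-- ===== SOURCE A (Python) =====
-- def odd_get_grundy_num(n):
--     if n == 3:
--         return 1
--
--     if n % 2 == 1:
--         return 0
--
--     c = 0
--     while n % 2 == 0:
--
--         n //= 2
--         c += 1
--
--     if n == 3:
--         return 1 + c % 2
--
--     return 2 - c % 2
-- ===== SOURCE B (Python) =====
-- def odd_get_grundy_num(n):
--     if n % 2 == 1:
--         return 1 if n == 3 else 0
--     m = n // 2
--     if m % 2 == 1: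
--         return 2 if m == 3 else 1
--     return 3 - odd_get_grundy_num(m)
-- ===== Notes on version B (the rewrite author's own statement) =====
-- stated objective: alternative
-- what changed: Replaces the while-loop that extracts the 2-adic valuation c and odd part (then branches on c%2 and odd==3) by a direct recursion on n//2 that returns 3 - g(n//2), with base cases at odd n and at n//2 odd; no valuation counter or odd-part variable exists in B.
import Mathlib
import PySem

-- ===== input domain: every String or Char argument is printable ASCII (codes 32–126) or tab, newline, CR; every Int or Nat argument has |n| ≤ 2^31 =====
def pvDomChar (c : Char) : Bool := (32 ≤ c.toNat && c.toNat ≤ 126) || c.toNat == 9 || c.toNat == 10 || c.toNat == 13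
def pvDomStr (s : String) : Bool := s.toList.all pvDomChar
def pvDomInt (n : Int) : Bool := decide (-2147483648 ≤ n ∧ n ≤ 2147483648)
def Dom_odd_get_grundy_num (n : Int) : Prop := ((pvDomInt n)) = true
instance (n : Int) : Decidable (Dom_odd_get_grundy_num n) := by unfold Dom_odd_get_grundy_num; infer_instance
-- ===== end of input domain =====

-- B replaces A's valuation-counting while-loop by a direct recursion g(n) = 3 - g(n//2): alternative decomposition, same cost.


-- ===== PORT A =====
-- A's while-loop: divides n by 2 while even, counting c.  The 'n ≠ 0' conjunct is a
-- totality guard only (Python loops forever at n = 0; Pre_ excludes it).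
def pvLoopA (n c : Int) : Int × Int :=
  if _h : PySem.Int.mod n 2 = 0 ∧ n ≠ 0 then
    pvLoopA (PySem.Int.floordiv n 2) (c + 1)
  else (n, c)
termination_by n.natAbs
decreasing_by
  rw [PySem.Int.floordiv_eq_ediv_of_pos (by norm_num)]
  rw [PySem.Int.mod_eq_emod_of_pos (by norm_num)] at _h
  omega

def odd_get_grundy_num (n : Int) : Int :=
  if n = 3 then 1
  else if PySem.Int.mod n 2 = 1 then 0
  else
    let p := pvLoopA n 0
    if p.1 = 3 then 1 + PySem.Int.mod p.2 2 else 2 - PySem.Int.mod p.2 2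

-- ===== PORT B =====
-- The 'if n = 0' branch is a totality guard only (Python B recurses forever at n = 0; Pre_ excludes it).
def odd_get_grundy_num_alt (n : Int) : Int :=
  if PySem.Int.mod n 2 = 1 then (if n = 3 then 1 else 0)
  else
    let m := PySem.Int.floordiv n 2
    if PySem.Int.mod m 2 = 1 then (if m = 3 then 2 else 1)
    else if n = 0 then 0
    else 3 - odd_get_grundy_num_alt m
termination_by n.natAbs
decreasing_by
  rw [PySem.Int.floordiv_eq_ediv_of_pos (by norm_num)]
  rename_i h1 _ _
  rw [PySem.Int.mod_eq_emod_of_pos (by norm_num)] at h1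
  omega

-- ===== PRECONDITION & SPEC =====
-- Pre_ excludes only n = 0, on which A's while-loop never terminates (A returns no value there).
def Pre_odd_get_grundy_num (n : Int) : Prop := n ≠ 0
instance (n : Int) : Decidable (Pre_odd_get_grundy_num n) := by unfold Pre_odd_get_grundy_num; infer_instance
def pvWitness_odd_get_grundy_num : Int := 6

def Spec_odd_get_grundy_num (n : Int) (out : Int) : Prop := out = odd_get_grundy_num_alt n
instance (n : Int) (out : Int) : Decidable (Spec_odd_get_grundy_num n out) := by unfold Spec_odd_get_grundy_num; infer_instance

-- ===== CLAIM (what is proved, stated in full; the proofs are below) =====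
def Claim_equal_odd_get_grundy_num : Prop := ∀ (n : Int), Dom_odd_get_grundy_num n → Pre_odd_get_grundy_num n → Spec_odd_get_grundy_num n (odd_get_grundy_num n)

-- ===== LEMMAS AND PROOFS =====
theorem pymod2 (a : Int) : PySem.Int.mod a 2 = a % 2 :=
  PySem.Int.mod_eq_emod_of_pos (by norm_num)

theorem pydiv2 (a : Int) : PySem.Int.floordiv a 2 = a / 2 :=
  PySem.Int.floordiv_eq_ediv_of_pos (by norm_num)

-- the accumulator c only shifts the second component of the loop result
theorem pvLoopA_shift : ∀ (k : Nat) (n c : Int), n.natAbs = k →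
    pvLoopA n c = ((pvLoopA n 0).1, (pvLoopA n 0).2 + c) := by
  intro k
  induction k using Nat.strong_induction_on with
  | _ k ih =>
    intro n c hk
    by_cases h : PySem.Int.mod n 2 = 0 ∧ n ≠ 0
    · have e1 : pvLoopA n c = pvLoopA (PySem.Int.floordiv n 2) (c + 1) := by
        conv_lhs => rw [pvLoopA]
        exact dif_pos h
      have e0 : pvLoopA n 0 = pvLoopA (PySem.Int.floordiv n 2) (0 + 1) := by
        conv_lhs => rw [pvLoopA]
        exact dif_pos h
      have hlt : (PySem.Int.floordiv n 2).natAbs < k := by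
        rw [pydiv2]; rw [pymod2] at h; omega
      rw [e1, e0, ih _ hlt _ (c + 1) rfl, ih _ hlt _ (0 + 1) rfl]
      simp only [Prod.mk.injEq, true_and]
      omega
    · have e1 : pvLoopA n c = (n, c) := by
        conv_lhs => rw [pvLoopA]
        exact dif_neg h
      have e0 : pvLoopA n 0 = (n, 0) := by
        conv_lhs => rw [pvLoopA]
        exact dif_neg h
      rw [e1, e0]
      simp

theorem even_case : ∀ (k : Nat) (n : Int), n.natAbs = k → n ≠ 0 → n % 2 = 0 →
    (if (pvLoopA n 0).1 = 3 then 1 + PySem.Int.mod (pvLoopA n 0).2 2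
     else 2 - PySem.Int.mod (pvLoopA n 0).2 2) = odd_get_grundy_num_alt n := by
  intro k
  induction k using Nat.strong_induction_on with
  | _ k ih =>
    intro n hk hn0 hev
    have hcond : PySem.Int.mod n 2 = 0 ∧ n ≠ 0 := by rw [pymod2]; exact ⟨hev, hn0⟩
    have hL : pvLoopA n 0 = ((pvLoopA (PySem.Int.floordiv n 2) 0).1,
        (pvLoopA (PySem.Int.floordiv n 2) 0).2 + 1) := by
      have e0 : pvLoopA n 0 = pvLoopA (PySem.Int.floordiv n 2) (0 + 1) := by
        conv_lhs => rw [pvLoopA]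
        exact dif_pos hcond
      rw [e0, pvLoopA_shift (PySem.Int.floordiv n 2).natAbs _ _ rfl]
      simp
    set m := PySem.Int.floordiv n 2 with hm
    have hme : m = n / 2 := pydiv2 n
    rw [odd_get_grundy_num_alt]
    have hnodd : ¬ PySem.Int.mod n 2 = 1 := by rw [pymod2]; omega
    simp only [hnodd, if_false, ← hm]
    by_cases hmo : m % 2 = 1
    · -- n/2 is odd: the loop stops after one more step
      have hstop : pvLoopA m 0 = (m, 0) := by
        conv_lhs => rw [pvLoopA]
        refine dif_neg ?_
        rw [pymod2]; omega
      have hmod2 : PySem.Int.mod m 2 = 1 := by rw [pymod2]; exact hmo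
      rw [hL, hstop]
      simp only [hmod2, if_true]
      by_cases h3 : m = 3 <;> simp [h3]
    · -- n/2 is even: recurse
      have hmev : m % 2 = 0 := by omega
      have hmn0 : m ≠ 0 := by rw [hme]; omega
      have hn00 : ¬ n = 0 := hn0
      have hlt : m.natAbs < k := by rw [hme]; omega
      have hmod2 : ¬ PySem.Int.mod m 2 = 1 := by rw [pymod2]; omega
      simp only [hmod2, if_false, hn00, if_false]
      rw [hL, ← ih _ hlt m rfl hmn0 hmev]
      by_cases h3 : (pvLoopA m 0).1 = 3 <;> simp [h3] <;> omega

theorem main_eq : ∀ (n : Int), n ≠ 0 → odd_get_grundy_num n = odd_get_grundy_num_alt n := by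
  intro n hn0
  rw [odd_get_grundy_num]
  by_cases h3 : n = 3
  · subst h3
    rw [odd_get_grundy_num_alt]
    norm_num [pymod2]
  · simp only [h3, if_false]
    by_cases hodd : n % 2 = 1
    · rw [odd_get_grundy_num_alt]
      simp [hodd, h3]
    · have hev : n % 2 = 0 := by omega
      have h : ¬ PySem.Int.mod n 2 = 1 := by rw [pymod2]; omega
      simp only [h, if_false]
      exact even_case n.natAbs n rfl hn0 hev

-- ===== VERDICT (by name: the statement is the Claim_ definition above) =====
theorem odd_get_grundy_num_spec : Claim_equal_odd_get_grundy_num := by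
  intro n _ hpre
  exact main_eq n hpre
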